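-- pv_equiv track=rewrite | github.com/akarshkumar0101/spaghetti | src/experiment_utils.py | align_configs
-- ===== SOURCE A (Python) =====
-- import copy
--
-- def align_configs(cfgs, default_cfg, prune=True):
--     cfgs = copy.deepcopy(cfgs)
--     for k in default_cfg.keys():  # make sure all cfgs have the default keys
--         for cfg in cfgs:
--             if k not in cfg:
--                 cfg[k] = default_cfg[k]
--     # assert all(c.keys() == default_config.keys() for c in configs)
--     if prune:  # prune away keys where all cfgs have the default val
--         for k in default_cfg.keys():
--             if all([cfg[k] == default_cfg[k] for cfg in cfgs]):
--                 for cfg in cfgs: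
--                     del cfg[k]
--     return cfgs
-- ===== SOURCE B (Python) =====
-- def align_configs(cfgs, default_cfg, prune=True):
--     # precompute the set of prunable keys, then rewrite each config in one pass
--     prunable = set()
--     if prune:
--         for k, v in default_cfg.items():
--             if all(cfg.get(k, v) == v for cfg in cfgs):
--                 prunable.add(k)
--     out = []
--     for cfg in cfgs:
--         new = {k: v for k, v in cfg.items() if k not in prunable}
--         for k, v in default_cfg.items():
--             if k not in prunable and k not in new:
--                 new[k] = v
--         out.append(new)
--     return out
-- ===== Notes on version B (the rewrite author's own statement) =====
-- stated objective: alternative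
-- what changed: A fills missing defaults into every config and then repeatedly sweeps all configs per key to decide and delete prunable keys; B first computes the prunable key set in one pass over the defaults (treating an absent key as equal to its default) and then rebuilds each config in a single filter-and-append pass, never materialising the filled-in intermediate configs.
import Mathlib
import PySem

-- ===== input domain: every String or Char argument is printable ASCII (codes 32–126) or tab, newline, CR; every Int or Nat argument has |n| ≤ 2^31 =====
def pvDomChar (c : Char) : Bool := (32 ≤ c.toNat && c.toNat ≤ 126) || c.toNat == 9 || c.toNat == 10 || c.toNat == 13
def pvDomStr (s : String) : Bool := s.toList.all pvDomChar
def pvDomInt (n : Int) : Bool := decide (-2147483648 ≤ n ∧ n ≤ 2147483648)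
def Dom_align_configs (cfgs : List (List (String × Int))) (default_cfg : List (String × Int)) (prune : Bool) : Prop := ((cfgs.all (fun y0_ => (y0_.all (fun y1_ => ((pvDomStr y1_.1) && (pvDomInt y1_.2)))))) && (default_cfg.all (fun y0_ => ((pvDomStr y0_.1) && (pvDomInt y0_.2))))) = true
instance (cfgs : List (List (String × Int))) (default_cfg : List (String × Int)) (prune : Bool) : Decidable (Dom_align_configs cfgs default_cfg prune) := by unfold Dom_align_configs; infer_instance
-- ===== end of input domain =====

-- B replaces A's fill-then-per-key-delete sweeps by a precomputed prunable-key set and a single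
-- filter-and-append rewrite of each config (alternative decomposition; return value only — A deepcopies, so neither mutates its arguments).


-- ===== PORT A =====
def align_configs (cfgs : List (List (String × Int))) (default_cfg : List (String × Int)) (prune : Bool) : List (List (String × Int)) :=
  let d := PySem.Dict.mk default_cfg
  -- cfgs = copy.deepcopy(cfgs): values are ints, so the copy is value-identical
  let ds := cfgs.map PySem.Dict.mk
  -- for k in default_cfg.keys(): for cfg in cfgs: if k not in cfg: cfg[k] = default_cfg[k]
  -- (default_cfg[k] cannot raise: k is drawn from default_cfg.keys())
  let ds := d.keys.foldl (fun cs k =>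
      cs.map (fun cfg => if cfg.contains k then cfg else cfg.insert k (d.getD k 0))) ds
  -- if prune: for k in default_cfg.keys(): if all cfg[k] == default_cfg[k]: del cfg[k] for every cfg
  -- (cfg[k] cannot raise: every cfg was just filled with all default keys)
  let ds := if prune then
      d.keys.foldl (fun cs k =>
        if cs.all (fun cfg => cfg.get? k == d.get? k) then cs.map (fun cfg => cfg.erase k) else cs) ds
    else ds
  ds.map PySem.Dict.items

-- ===== PORT B =====
def align_configs_alt (cfgs : List (List (String × Int))) (default_cfg : List (String × Int)) (prune : Bool) : List (List (String × Int)) :=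
  let d := PySem.Dict.mk default_cfg
  let ds := cfgs.map PySem.Dict.mk
  -- prunable = {k | every cfg has k absent or equal to its default}
  let prunable : PySem.Set String :=
    if prune then
      d.items.foldl (fun s kv =>
        if ds.all (fun cfg => cfg.getD kv.1 kv.2 == kv.2) then s.add kv.1 else s) PySem.Set.empty
    else PySem.Set.empty
  -- one rewrite pass per config: drop prunable keys, append missing non-prunable defaults
  ds.map (fun cfg =>
    let base := PySem.Dict.mk (cfg.items.filter (fun kv => !(prunable.contains kv.1)))
    let filled := d.items.foldl (fun nw kv =>
        if !(prunable.contains kv.1) && !(nw.contains kv.1) then nw.insert kv.1 kv.2 else nw) base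
    filled.items)

-- ===== PRECONDITION & SPEC =====
-- Pre_ excludes association lists that carry a duplicated key: they do not represent any Python
-- dict (A's arguments are dicts), so A's behaviour is not defined for them under the type convention.
def Pre_align_configs (cfgs : List (List (String × Int))) (default_cfg : List (String × Int)) (prune : Bool) : Prop :=
  (default_cfg.map Prod.fst).Nodup ∧ ∀ cfg ∈ cfgs, (cfg.map Prod.fst).Nodup
instance (cfgs : List (List (String × Int))) (default_cfg : List (String × Int)) (prune : Bool) : Decidable (Pre_align_configs cfgs default_cfg prune) := by unfold Pre_align_configs; infer_instance

def pvWitness_align_configs : (List (List (String × Int))) × (List (String × Int)) × Bool :=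
  ([[("a", 1), ("c", 7)], [("b", 2)]], [("a", 1), ("b", 2)], true)

def Spec_align_configs (cfgs : List (List (String × Int))) (default_cfg : List (String × Int)) (prune : Bool) (out : List (List (String × Int))) : Prop := out = align_configs_alt cfgs default_cfg prune
instance (cfgs : List (List (String × Int))) (default_cfg : List (String × Int)) (prune : Bool) (out : List (List (String × Int))) : Decidable (Spec_align_configs cfgs default_cfg prune out) := by unfold Spec_align_configs; infer_instance

-- ===== CLAIM (what is proved, stated in full; the proofs are below) =====
def Claim_equal_align_configs : Prop := ∀ (cfgs : List (List (String × Int))) (default_cfg : List (String × Int)) (prune : Bool), Dom_align_configs cfgs default_cfg prune → Pre_align_configs cfgs default_cfg prune → Spec_align_configs cfgs default_cfg prune (align_configs cfgs default_cfg prune)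

-- ===== LEMMAS AND PROOFS =====

-- L1: a fold that maps every element with a per-key step is the map of the per-element fold
theorem pv_foldl_map_comm {α β : Type} (ks : List α) (g : α → β → β) (cs : List β) :
    ks.foldl (fun cs k => cs.map (g k)) cs = cs.map (fun c => ks.foldl (fun c k => g k c) c) := by
  induction ks generalizing cs with
  | nil => simp
  | cons k ks ih => simp [ih, List.map_map, Function.comp_def]

-- L3a: folding erase over a key list filters the items by those keys
theorem pv_foldl_erase_items (S : List String) (c : PySem.Dict String Int) :
    (S.foldl PySem.Dict.erase c).items = c.items.filter (fun p => !(decide (p.1 ∈ S))) := by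
  induction S generalizing c with
  | nil => simp
  | cons k S ih =>
      simp only [List.foldl_cons, ih, PySem.Dict.erase, List.filter_filter]
      apply List.filter_congr
      intro p _
      by_cases h1 : p.1 = k <;> by_cases h2 : p.1 ∈ S <;> simp [h1, h2]

-- L3b: erasing other keys does not change a lookup
theorem pv_get?_foldl_erase (S : List String) (c : PySem.Dict String Int) (k : String) (hk : k ∉ S) :
    (S.foldl PySem.Dict.erase c).get? k = c.get? k := by
  rw [PySem.Dict.get?, PySem.Dict.get?, pv_foldl_erase_items]
  congr 1
  induction c.items with
  | nil => simp
  | cons p l ih =>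
      by_cases h : p.1 = k
      · simp [List.filter_cons, h, hk, List.find?_cons]
      · by_cases h2 : p.1 ∈ S <;> simp [List.filter_cons, h2, List.find?_cons, h, ih]

-- L2: the fill loop appends the missing keys, in key order
theorem pv_fill_items (ks : List String) (f : String → Int) (c : PySem.Dict String Int)
    (hnd : ks.Nodup) :
    (ks.foldl (fun c k => if c.contains k then c else c.insert k (f k)) c).items
      = c.items ++ (ks.filter (fun k => !(c.contains k))).map (fun k => (k, f k)) := by
  induction ks generalizing c with
  | nil => simp
  | cons k ks ih =>
      rcases List.nodup_cons.mp hnd with ⟨hk, hnd'⟩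
      rw [List.foldl_cons, List.filter_cons]
      by_cases h : c.contains k = true
      · rw [if_pos h, if_neg (by simp [h]), ih _ hnd']
      · rw [if_neg h, if_pos (by simp [h]), ih _ hnd',
          PySem.Dict.items_insert_of_not_contains _ _ (by simpa using h),
          List.filter_congr (l := ks) (q := fun x => !(c.contains x)) ?_]
        · simp
        · intro x hx
          have hxk : x ≠ k := fun e => hk (e ▸ hx)
          simp [PySem.Dict.contains_insert, hxk]

-- find? by key on a plain key list
theorem pv_find?_beq (x : String) (L : List String) :
    L.find? (fun k => k == x) = if x ∈ L then some x else none := by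
  induction L with
  | nil => simp
  | cons a L ih =>
      by_cases h : a = x
      · simp [List.find?_cons, h]
      · have hb : (a == x) = false := by simpa using h
        simp [List.find?_cons, hb, ih, Ne.symm h]

-- get? after the fill loop
theorem pv_fill_get? (ks : List String) (f : String → Int) (c : PySem.Dict String Int)
    (hnd : ks.Nodup) (x : String) :
    (ks.foldl (fun c k => if c.contains k then c else c.insert k (f k)) c).get? x
      = if c.contains x then c.get? x else (if x ∈ ks then some (f x) else none) := by
  rw [PySem.Dict.get?, pv_fill_items ks f c hnd, List.find?_append]
  by_cases h : c.contains x = true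
  · have : ∃ p ∈ c.items, (p.1 == x) = true := by
      simpa [PySem.Dict.contains, List.any_eq_true] using h
    rcases List.find?_isSome.mpr this |> Option.isSome_iff_exists.mp with ⟨p, hp⟩
    simp [h, hp, PySem.Dict.get?]
  · have hn : List.find? (fun p => p.1 == x) c.items = none := by
      rw [List.find?_eq_none]
      intro p hp hb
      exact h (List.any_eq_true.mpr ⟨p, hp, hb⟩)
    rw [hn, if_neg h, Option.none_or, List.find?_map]
    have hcomp : ((fun p : String × Int => p.1 == x) ∘ fun k => (k, f k)) = fun k => k == x := rfl
    rw [hcomp, pv_find?_beq]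
    by_cases hx : x ∈ ks
    · have : x ∈ ks.filter (fun k => !(c.contains k)) := by
        simp [List.mem_filter, hx, h]
      simp [this, hx]
    · have : x ∉ ks.filter (fun k => !(c.contains k)) := by
        simp [List.mem_filter, hx]
      simp [this, hx]

-- A's prune loop: the per-key decision never changes, so it erases a fixed key set
theorem pv_prune_fold (d : PySem.Dict String Int) (ds' : List (PySem.Dict String Int))
    (ks S : List String) (hnd : ks.Nodup) (hdisj : ∀ k ∈ ks, k ∉ S) :
    ks.foldl (fun cs k => if cs.all (fun c => c.get? k == d.get? k) then cs.map (fun c => c.erase k) else cs)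
      (ds'.map (fun c => S.foldl PySem.Dict.erase c))
    = ds'.map (fun c =>
        (S ++ ks.filter (fun k => ds'.all (fun c => c.get? k == d.get? k))).foldl PySem.Dict.erase c) := by
  induction ks generalizing S with
  | nil => simp
  | cons k ks ih =>
      rcases List.nodup_cons.mp hnd with ⟨hk, hnd'⟩
      have hkS : k ∉ S := hdisj k (by simp)
      have hcond : (ds'.map (fun c => S.foldl PySem.Dict.erase c)).all (fun c => c.get? k == d.get? k)
          = ds'.all (fun c => c.get? k == d.get? k) := by
        rw [List.all_map]
        exact List.all_congr rfl (fun c => by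
          simp [Function.comp, pv_get?_foldl_erase S c k hkS])
      simp only [List.foldl_cons]
      rw [hcond]
      by_cases hb : ds'.all (fun c => c.get? k == d.get? k) = true
      · rw [if_pos hb, List.map_map]
        have hmm : ((fun c : PySem.Dict String Int => c.erase k) ∘
              fun c : PySem.Dict String Int => S.foldl PySem.Dict.erase c)
            = fun c : PySem.Dict String Int => (S ++ [k]).foldl PySem.Dict.erase c := by
          funext c; simp [List.foldl_append]
        rw [hmm, ih (S ++ [k]) hnd' ?_]
        · rw [List.filter_cons, if_pos hb]; simp
        · intro x hx
          simp only [List.mem_append, List.mem_singleton]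
          rintro (hxS | rfl)
          · exact hdisj x (by simp [hx]) hxS
          · exact hk hx
      · rw [if_neg hb, ih S hnd' (fun x hx => hdisj x (by simp [hx])), List.filter_cons, if_neg hb]

-- membership in B's prunable set
theorem pv_mem_set_fold (q : String × Int → Bool) (l : List (String × Int)) (s0 : PySem.Set String)
    (x : String) :
    x ∈ l.foldl (fun s kv => if q kv then s.add kv.1 else s) s0
      ↔ x ∈ s0 ∨ ∃ kv ∈ l, q kv = true ∧ kv.1 = x := by
  induction l generalizing s0 with
  | nil => simp
  | cons kv l ih =>
      by_cases h : q kv = true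
      · simp only [List.foldl_cons, h, if_pos, ih, PySem.Set.mem_add]
        constructor
        · rintro ((hs | rfl) | hr)
          · exact Or.inl hs
          · exact Or.inr ⟨kv, by simp, h, rfl⟩
          · rcases hr with ⟨p, hp, hq, he⟩; exact Or.inr ⟨p, by simp [hp], hq, he⟩
        · rintro (hs | ⟨p, hp, hq, he⟩)
          · exact Or.inl (Or.inl hs)
          · rcases List.mem_cons.mp hp with rfl | hp'
            · exact Or.inl (Or.inr he.symm)
            · exact Or.inr ⟨p, hp', hq, he⟩
      · rw [List.foldl_cons, if_neg h, ih]
        constructor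
        · rintro (hs | ⟨p, hp, hq, he⟩)
          · exact Or.inl hs
          · exact Or.inr ⟨p, by simp [hp], hq, he⟩
        · rintro (hs | ⟨p, hp, hq, he⟩)
          · exact Or.inl hs
          · rcases List.mem_cons.mp hp with rfl | hp'
            · exact absurd hq h
            · exact Or.inr ⟨p, hp', hq, he⟩

-- membership test on the filtered base dict
theorem pv_contains_mk_filter (g : String → Bool) (l : List (String × Int)) (x : String) :
    (PySem.Dict.mk (l.filter (fun kv => g kv.1))).contains x
      = ((PySem.Dict.mk l).contains x && g x) := by
  simp only [PySem.Dict.contains]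
  induction l with
  | nil => simp
  | cons kv l ih =>
      by_cases hg : g kv.1 = true
      · by_cases hx : (kv.1 == x) = true
        · have : g x = true := (beq_iff_eq.mp hx) ▸ hg
          simp [List.filter_cons, hg, hx, this]
        · simp [List.filter_cons, hg, hx, ih]
      · by_cases hx : (kv.1 == x) = true
        · have hgx : g x = false := (beq_iff_eq.mp hx) ▸ (by simpa using hg)
          simp [List.filter_cons, hg, hx, ih, hgx]
        · simp [List.filter_cons, hg, hx, ih]

-- L4:-- L4: B's append loop appends exactly the missing non-prunable default items
theorem pv_append_items (pr : String → Bool) (l : List (String × Int)) (base : PySem.Dict String Int)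
    (hnd : (l.map Prod.fst).Nodup) :
    (l.foldl (fun nw kv => if !(pr kv.1) && !(nw.contains kv.1) then nw.insert kv.1 kv.2 else nw) base).items
      = base.items ++ l.filter (fun kv => !(pr kv.1) && !(base.contains kv.1)) := by
  induction l generalizing base with
  | nil => simp
  | cons kv l ih =>
      rcases List.nodup_cons.mp hnd with ⟨hk, hnd'⟩
      rw [List.foldl_cons, List.filter_cons]
      by_cases h : (!(pr kv.1) && !(base.contains kv.1)) = true
      · have hc : base.contains kv.1 = false := by
          rcases Bool.and_eq_true .. |>.mp h with ⟨_, h2⟩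
          simpa using h2
        rw [if_pos h, if_pos h, ih _ hnd',
          PySem.Dict.items_insert_of_not_contains _ _ hc,
          List.filter_congr (l := l) (q := fun p => !(pr p.1) && !(base.contains p.1)) ?_]
        · simp
        · intro p hp
          have hpk : p.1 ≠ kv.1 := by
            intro e; exact hk (e ▸ List.mem_map_of_mem hp)
          have hb : (p.1 == kv.1) = false := by simpa using hpk
          simp [PySem.Dict.contains_insert, hb]
      · rw [if_neg h, if_neg h, ih _ hnd']

-- A's per-config result: fill then erase the PL keys = filter by PL, append the missing non-PL defaults
theorem pv_AB_per_config (d c : PySem.Dict String Int) (hdk : d.keys.Nodup)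
    (pr : String → Bool) (PL : List String) (hPR : ∀ x, pr x = decide (x ∈ PL)) :
    (PL.foldl PySem.Dict.erase
       (d.keys.foldl (fun c k => if c.contains k then c else c.insert k (d.getD k 0)) c)).items
    = c.items.filter (fun kv => !(pr kv.1))
      ++ d.items.filter (fun kv => !(pr kv.1) && !(c.contains kv.1)) := by
  rw [pv_foldl_erase_items, pv_fill_items _ _ _ hdk, List.filter_append]
  congr 1
  · apply List.filter_congr
    intro p _
    rw [hPR p.1]
  · rw [List.filter_map, List.filter_filter, PySem.Dict.items_eq_map_keys d hdk 0, List.filter_map]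
    congr 1
    apply List.filter_congr
    intro k _
    simp only [Function.comp]
    rw [hPR k]

-- B's per-config result, with the base membership test folded away
theorem pv_B_per_config (d c : PySem.Dict String Int) (hdif : (d.items.map Prod.fst).Nodup)
    (pr : String → Bool) :
    (d.items.foldl (fun nw kv => if !(pr kv.1) && !(nw.contains kv.1) then nw.insert kv.1 kv.2 else nw)
        (PySem.Dict.mk (c.items.filter (fun kv => !(pr kv.1))))).items
    = c.items.filter (fun kv => !(pr kv.1))
      ++ d.items.filter (fun kv => !(pr kv.1) && !(c.contains kv.1)) := by
  rw [pv_append_items pr d.items _ hdif]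
  congr 1
  apply List.filter_congr
  intro kv _
  have hbc : (PySem.Dict.mk (c.items.filter (fun kv => !(pr kv.1)))).contains kv.1
      = ((PySem.Dict.mk c.items).contains kv.1 && !(pr kv.1)) :=
    pv_contains_mk_filter (fun x => !(pr x)) c.items kv.1
  rw [hbc]
  cases hpr : pr kv.1 <;> cases hc : (PySem.Dict.mk c.items).contains kv.1 <;> simp [hpr, hc]

-- the prune decision A takes on the filled configs equals B's absent-or-default test on the originals
theorem pv_fill_cond (d : PySem.Dict String Int) (hdk : d.keys.Nodup)
    (c : PySem.Dict String Int) (x : String) (v : Int) (hmem : (x, v) ∈ d.items) :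
    ((d.keys.foldl (fun c k => if c.contains k then c else c.insert k (d.getD k 0)) c).get? x
        == d.get? x)
      = (c.getD x v == v) := by
  have hx : x ∈ d.keys := by
    simpa [PySem.Dict.keys] using List.mem_map_of_mem (f := fun p : String × Int => p.1) hmem
  have hg : d.get? x = some v := PySem.Dict.get?_of_mem_items d hmem hdk
  have hgD : d.getD x 0 = v := by rw [PySem.Dict.getD, hg]; rfl
  rw [pv_fill_get? _ _ _ hdk, hg]
  by_cases hc : c.contains x = true
  · rw [if_pos hc, PySem.Dict.contains_eq_isSome_get?] at *
    obtain ⟨w, hw⟩ := Option.isSome_iff_exists.mp hc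
    rw [hw, PySem.Dict.getD, hw]
    simp
  · have hnone : c.get? x = none := by
      rw [PySem.Dict.contains_eq_isSome_get?] at hc
      exact Option.not_isSome_iff_eq_none.mp (by simpa using hc)
    rw [if_neg hc, if_pos hx, hgD, PySem.Dict.getD, hnone]
    simp

-- same, lifted to the whole config list
theorem pv_allB (d : PySem.Dict String Int) (hdk : d.keys.Nodup)
    (ds : List (PySem.Dict String Int)) (x : String) (v : Int) (hmem : (x, v) ∈ d.items) :
    ((ds.map (fun c => d.keys.foldl (fun c k => if c.contains k then c else c.insert k (d.getD k 0)) c)).all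
        (fun c => c.get? x == d.get? x))
      = ds.all (fun c => c.getD x v == v) := by
  rw [List.all_map]
  exact List.all_congr rfl (fun c => pv_fill_cond d hdk c x v hmem)

-- B's prunable set is exactly the key set A's prune loop erases
theorem pv_prunable_eq (d : PySem.Dict String Int) (hdk : d.keys.Nodup)
    (ds : List (PySem.Dict String Int)) (x : String) :
    (d.items.foldl (fun s kv =>
        if ds.all (fun cfg => cfg.getD kv.1 kv.2 == kv.2) then s.add kv.1 else s)
        PySem.Set.empty).contains x
      = decide (x ∈ d.keys.filter (fun k =>
          (ds.map (fun c => d.keys.foldl (fun c k => if c.contains k then c else c.insert k (d.getD k 0)) c)).all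
            (fun c => c.get? k == d.get? k))) := by
  have : (d.items.foldl (fun s kv =>
        if ds.all (fun cfg => cfg.getD kv.1 kv.2 == kv.2) then s.add kv.1 else s)
        PySem.Set.empty).contains x
      = decide (x ∈ d.items.foldl (fun s kv =>
        if ds.all (fun cfg => cfg.getD kv.1 kv.2 == kv.2) then s.add kv.1 else s)
        PySem.Set.empty) := by
    simp [PySem.Set.contains]
  rw [this, decide_eq_decide]
  rw [pv_mem_set_fold, List.mem_filter]
  constructor
  · rintro (hs | ⟨⟨k, v⟩, hmem, hq, rfl⟩)
    · exact absurd hs (by simp [PySem.Set.empty])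
    · refine ⟨by simpa [PySem.Dict.keys] using List.mem_map_of_mem (f := fun p : String × Int => p.1) hmem, ?_⟩
      rw [pv_allB d hdk ds k v hmem]
      exact hq
  · rintro ⟨hk, hall⟩
    obtain ⟨v, hmem⟩ : ∃ v, (x, v) ∈ d.items := by simpa [PySem.Dict.keys] using hk
    refine Or.inr ⟨(x, v), hmem, ?_, rfl⟩
    rw [← pv_allB d hdk ds x v hmem]
    exact hall

-- corollary of pv_prune_fold with no keys erased yet
theorem pv_prune_fold_nil (d : PySem.Dict String Int) (ds' : List (PySem.Dict String Int))
    (ks : List String) (hnd : ks.Nodup) :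
    ks.foldl (fun cs k => if cs.all (fun c => c.get? k == d.get? k) then cs.map (fun c => c.erase k) else cs) ds'
    = ds'.map (fun c =>
        (ks.filter (fun k => ds'.all (fun c => c.get? k == d.get? k))).foldl PySem.Dict.erase c) := by
  have h := pv_prune_fold d ds' ks [] hnd (by simp)
  simpa using h

-- ===== VERDICT (by name: the statement is the Claim_ definition above) =====
theorem align_configs_spec : Claim_equal_align_configs := by
  intro cfgs default_cfg prune _dom hpre
  rcases hpre with ⟨hd, _hcfg⟩
  have hdk : (PySem.Dict.mk default_cfg).keys.Nodup := by
    simpa [PySem.Dict.keys] using hd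
  have hdif : ((PySem.Dict.mk default_cfg).items.map Prod.fst).Nodup := hd
  unfold Spec_align_configs align_configs align_configs_alt
  cases prune
  · -- prune = False
    simp only [Bool.false_eq_true, if_false]
    rw [pv_foldl_map_comm, List.map_map]
    apply List.map_congr_left
    intro c _
    have hPR : ∀ x : String, (PySem.Set.empty : PySem.Set String).contains x
        = decide (x ∈ ([] : List String)) := by
      intro x; simp [PySem.Set.contains, PySem.Set.empty]
    have hA := pv_AB_per_config (PySem.Dict.mk default_cfg) c hdk _ [] hPR
    simp only [List.foldl_nil] at hA
    rw [Function.comp_apply, hA, pv_B_per_config _ _ hdif]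
  · -- prune = True
    simp only [if_true]
    rw [pv_foldl_map_comm, pv_prune_fold_nil _ _ _ hdk, List.map_map, List.map_map]
    apply List.map_congr_left
    intro c _
    rw [Function.comp_apply, Function.comp_apply]
    rw [pv_AB_per_config (PySem.Dict.mk default_cfg) c hdk _ _
      (pv_prunable_eq (PySem.Dict.mk default_cfg) hdk (cfgs.map PySem.Dict.mk)),
      pv_B_per_config _ _ hdif]
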